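-- pv_equiv track=rewrite | github.com/alejandro-robles7/unit-testing | notebooks/utils/test_convert_to_int.py | convert_to_int_ch2
-- ===== SOURCE A (Python) =====
-- def convert_to_int_ch2(integer_string_with_commas):
--     if len(integer_string_with_commas) > 3 and "," not in integer_string_with_commas:
--       return None
--     comma_separated_parts = integer_string_with_commas.split(",")
--     if not all([len(part) == 3 for part in comma_separated_parts]):
--       return None
--     integer_string_without_commas = "".join(comma_separated_parts)
--     try:
--       return integer_string_without_commas
--     except ValueError:
--       return None
-- ===== SOURCE B (Python) =====
-- def convert_to_int_ch2(integer_string_with_commas):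
--     # single left-to-right scan: every comma-separated run must be exactly 3 chars
--     run = 0
--     for ch in integer_string_with_commas:
--         if ch == ',':
--             if run != 3:
--                 return None
--             run = 0
--         else:
--             run += 1
--     if run != 3:
--         return None
--     return integer_string_with_commas.replace(',', '')
-- ===== Notes on version B (the rewrite author's own statement) =====
-- stated objective: alternative
-- what changed: Replaces split-into-parts + per-part length comprehension + join with a single-pass run-length state machine over the characters followed by one replace; the redundant len>3/no-comma guard and dead try/except are dropped.
import Mathlib
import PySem

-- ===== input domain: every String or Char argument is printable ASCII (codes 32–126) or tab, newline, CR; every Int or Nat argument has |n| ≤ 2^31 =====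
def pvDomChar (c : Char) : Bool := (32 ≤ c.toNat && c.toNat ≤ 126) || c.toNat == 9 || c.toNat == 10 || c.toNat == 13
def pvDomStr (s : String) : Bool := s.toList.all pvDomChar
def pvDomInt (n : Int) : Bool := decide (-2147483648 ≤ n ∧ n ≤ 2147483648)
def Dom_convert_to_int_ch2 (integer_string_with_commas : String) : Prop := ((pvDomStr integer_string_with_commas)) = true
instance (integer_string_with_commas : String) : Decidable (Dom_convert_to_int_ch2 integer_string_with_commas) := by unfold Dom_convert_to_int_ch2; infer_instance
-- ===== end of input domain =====

-- B replaces A's split/length-comprehension/join pipeline with a single-pass run-length scan plus one replace (alternative decomposition, same cost).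


-- ===== PORT A =====
-- ''.join(parts) on List Char parts is PySem.Chars.join [] wrapped back into a String.
def convert_to_int_ch2 (integer_string_with_commas : String) : Option String :=
  if PySem.Str.len integer_string_with_commas > 3 ∧
      PySem.Str.isIn "," integer_string_with_commas = false then none
  else
    let comma_separated_parts := PySem.Chars.splitOn integer_string_with_commas.toList [',']
    if ¬ (comma_separated_parts.all (fun part => PySem.Chars.len part == 3) = true) then none
    else some (String.ofList (PySem.Chars.join [] comma_separated_parts))
    -- the try/except around returning the string can never raise: returned directly

-- ===== PORT B =====
-- the for-loop of Source B: `run` counts chars since the last comma; False = early `return None`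
def pvScan : List Char → Nat → Bool
  | [], run => run == 3
  | c :: t, run => if c = ',' then (if run ≠ 3 then false else pvScan t 0) else pvScan t (run + 1)

def convert_to_int_ch2_alt (integer_string_with_commas : String) : Option String :=
  if pvScan integer_string_with_commas.toList 0 then
    some (PySem.Str.replace integer_string_with_commas "," "")
  else none

-- ===== PRECONDITION & SPEC =====
def Spec_convert_to_int_ch2 (integer_string_with_commas : String) (out : Option String) : Prop := out = convert_to_int_ch2_alt integer_string_with_commas
instance (integer_string_with_commas : String) (out : Option String) : Decidable (Spec_convert_to_int_ch2 integer_string_with_commas out) := by unfold Spec_convert_to_int_ch2; infer_instance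

-- ===== CLAIM (what is proved, stated in full; the proofs are below) =====
def Claim_equal_convert_to_int_ch2 : Prop := ∀ (integer_string_with_commas : String), Dom_convert_to_int_ch2 integer_string_with_commas → Spec_convert_to_int_ch2 integer_string_with_commas (convert_to_int_ch2 integer_string_with_commas)

-- ===== LEMMAS AND PROOFS =====
-- proof-only model of A's split(",") : parts of l with `cur` the (reversed) chars of the current part
def pvParts : List Char → List Char → List (List Char)
  | [], cur => [cur.reverse]
  | c :: t, cur => if c = ',' then cur.reverse :: pvParts t [] else pvParts t (c :: cur)

theorem pvScan_nil (run : Nat) : pvScan [] run = (run == 3) := rfl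

theorem pvScan_cons (c : Char) (t : List Char) (run : Nat) :
    pvScan (c :: t) run =
      if c = ',' then (if run ≠ 3 then false else pvScan t 0) else pvScan t (run + 1) := rfl

theorem pvParts_cons (c : Char) (t cur : List Char) :
    pvParts (c :: t) cur =
      if c = ',' then cur.reverse :: pvParts t [] else pvParts t (c :: cur) := rfl

theorem pvSplitOn_go_nil (fuel : Nat) (cur : List Char) (acc : List (List Char)) :
    PySem.Chars.splitOn.go [','] (fuel+1) [] cur acc = (cur.reverse :: acc).reverse := rfl

theorem pvSplitOn_go_cons (fuel : Nat) (c : Char) (t cur : List Char) (acc : List (List Char)) :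
    PySem.Chars.splitOn.go [','] (fuel+1) (c :: t) cur acc =
      (if [','].isPrefixOf (c :: t) then
        PySem.Chars.splitOn.go [','] fuel (List.drop 1 (c :: t)) [] (cur.reverse :: acc)
       else PySem.Chars.splitOn.go [','] fuel t (c :: cur) acc) := rfl

theorem pvPrefixOf_comma (c : Char) (t : List Char) :
    ([','].isPrefixOf (c :: t)) = (c = ',' : Bool) := by
  by_cases e : c = ','
  · simp [List.isPrefixOf, e]
  · simp [List.isPrefixOf, e]
    exact fun h => e h.symm

theorem pvSplitOn_go_eq (fuel : Nat) (l cur : List Char) (acc : List (List Char)) (h : l.length < fuel) :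
    PySem.Chars.splitOn.go [','] fuel l cur acc = acc.reverse ++ pvParts l cur := by
  induction fuel generalizing l cur acc with
  | zero => omega
  | succ fuel ih =>
    cases l with
    | nil => rw [pvSplitOn_go_nil]; simp [pvParts]
    | cons c t =>
      rw [pvSplitOn_go_cons, pvPrefixOf_comma]
      by_cases hc : c = ','
      · rw [if_pos (by simp [hc])]
        rw [ih (List.drop 1 (c :: t)) [] (cur.reverse :: acc) (by simp at h ⊢; omega)]
        simp [pvParts_cons, hc]
      · rw [if_neg (by simp [hc])]
        rw [ih t (c :: cur) acc (by simp at h ⊢; omega)]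
        simp [pvParts_cons, hc]

theorem pvSplitOn_eq (l : List Char) :
    PySem.Chars.splitOn l [','] = pvParts l [] := by
  rw [PySem.Chars.splitOn, pvSplitOn_go_eq (l.length + 1) l [] [] (by omega)]
  simp

theorem pvReplace_go_nil (fuel : Nat) (acc : List Char) :
    PySem.Chars.replace.go [','] [] fuel [] acc = acc.reverse := by
  cases fuel with
  | zero =>
    have h : PySem.Chars.replace.go [','] [] 0 [] acc = acc.reverse ++ [] := rfl
    rw [h, List.append_nil]
  | succ fuel => rfl

theorem pvReplace_go_cons (fuel : Nat) (c : Char) (t acc : List Char) :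
    PySem.Chars.replace.go [','] [] (fuel+1) (c :: t) acc =
      (if [','].isPrefixOf (c :: t) then
        PySem.Chars.replace.go [','] [] fuel (List.drop 1 (c :: t)) ([].reverse ++ acc)
       else PySem.Chars.replace.go [','] [] fuel t (c :: acc)) := rfl

theorem pvReplace_go_eq (l : List Char) (fuel : Nat) (acc : List Char) (h : l.length ≤ fuel) :
    PySem.Chars.replace.go [','] [] fuel l acc =
      acc.reverse ++ l.filter (fun c => !(c = ',')) := by
  induction l generalizing fuel acc with
  | nil => rw [pvReplace_go_nil]; simp
  | cons c t ih =>
    cases fuel with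
    | zero => simp at h
    | succ fuel =>
      rw [pvReplace_go_cons, pvPrefixOf_comma]
      by_cases hc : c = ','
      · rw [if_pos (by simp [hc])]
        simp only [List.drop_one, List.tail_cons, List.reverse_nil, List.nil_append]
        rw [ih fuel acc (by simp at h ⊢; omega)]
        simp [hc]
      · rw [if_neg (by simp [hc])]
        rw [ih fuel (c :: acc) (by simp at h ⊢; omega)]
        simp [hc]

theorem pvReplace_eq (l : List Char) :
    PySem.Chars.replace l [','] [] = l.filter (fun c => !(c = ',')) := by
  rw [PySem.Chars.replace]
  simp only [List.isEmpty_cons, Bool.false_eq_true, if_false]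
  simpa using pvReplace_go_eq l l.length [] (le_refl _)

theorem pvJoin_flatten (parts : List (List Char)) :
    PySem.Chars.join [] parts = parts.flatten := by
  induction parts with
  | nil => rfl
  | cons p ps ih =>
    cases ps with
    | nil => simp [PySem.Chars.join, List.intercalate]
    | cons q qs =>
      simp only [PySem.Chars.join, List.intercalate] at ih ⊢
      rw [List.intersperse_cons₂]
      simp only [List.flatten_cons] at ih ⊢
      rw [ih]
      simp

theorem pvParts_flatten (l cur : List Char) :
    (pvParts l cur).flatten = cur.reverse ++ l.filter (fun c => !(c = ',')) := by
  induction l generalizing cur with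
  | nil => simp [pvParts]
  | cons c t ih =>
    rw [pvParts_cons]
    by_cases hc : c = ','
    · rw [if_pos hc]
      simp only [List.flatten_cons]
      rw [ih []]
      simp [hc]
    · rw [if_neg hc]
      rw [ih (c :: cur)]
      simp [hc]

theorem pvScan_parts (l cur : List Char) :
    pvScan l cur.length = (pvParts l cur).all (fun p => p.length == 3) := by
  induction l generalizing cur with
  | nil => simp [pvScan_nil, pvParts]
  | cons c t ih =>
    rw [pvScan_cons, pvParts_cons]
    by_cases hc : c = ','
    · rw [if_pos hc, if_pos hc, List.all_cons]
      by_cases h3 : cur.length = 3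
      · rw [if_neg (fun hn => hn h3)]
        have h0 : pvScan t 0 = pvScan t ([] : List Char).length := rfl
        rw [h0, ih []]
        simp [h3]
      · rw [if_pos h3]
        simp [h3]
    · rw [if_neg hc, if_neg hc]
      have h1 : cur.length + 1 = (c :: cur).length := rfl
      rw [h1, ih (c :: cur)]

theorem pvParts_no_comma (l cur : List Char) (h : ',' ∉ l) :
    pvParts l cur = [cur.reverse ++ l] := by
  induction l generalizing cur with
  | nil => simp [pvParts]
  | cons c t ih =>
    have hc : c ≠ ',' := fun e => h (e ▸ List.mem_cons_self)
    rw [pvParts_cons, if_neg hc]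
    rw [ih (c :: cur) (fun m => h (List.mem_cons_of_mem _ m))]
    simp

theorem pvLenEq (p : List Char) : (PySem.Chars.len p == (3 : Int)) = (p.length == 3) := by
  by_cases h : p.length = 3
  · simp [PySem.Chars.len, h]
  · simp [PySem.Chars.len, h]
    omega

-- ===== VERDICT (by name: the statement is the Claim_ definition above) =====
theorem convert_to_int_ch2_spec : Claim_equal_convert_to_int_ch2 := by
  intro s _
  unfold Spec_convert_to_int_ch2 convert_to_int_ch2 convert_to_int_ch2_alt
  have hscan : pvScan s.toList 0 = (pvParts s.toList []).all (fun p => p.length == 3) := by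
    have h0 : pvScan s.toList 0 = pvScan s.toList ([] : List Char).length := rfl
    rw [h0, pvScan_parts s.toList []]
  by_cases hg : PySem.Str.len s > 3 ∧ PySem.Str.isIn "," s = false
  · -- A's redundant guard: no comma and length > 3 ⇒ the one part fails the length test, B's scan ends on a non-3 run
    rw [if_pos hg]
    have hmem : ',' ∉ s.toList := by
      intro hm
      obtain ⟨u, v, huv⟩ := List.append_of_mem hm
      have : PySem.Str.isIn "," s = true := by
        rw [PySem.Str.isIn]
        rw [PySem.Chars.isIn_iff_infix]
        exact ⟨u, v, by simp [huv]⟩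
      rw [hg.2] at this; exact Bool.false_ne_true this
    have hlen : s.toList.length ≠ 3 := by
      have := hg.1
      rw [PySem.Str.len] at this
      omega
    have hlen' : s.length ≠ 3 := by rw [← String.length_toList]; exact hlen
    rw [hscan, pvParts_no_comma s.toList [] hmem]
    simp [hlen']
  · rw [if_neg hg]
    rw [pvSplitOn_eq]
    have hfun : (fun part => PySem.Chars.len part == (3 : Int)) = (fun p : List Char => p.length == 3) :=
      funext pvLenEq
    rw [hfun, hscan]
    by_cases hall : (pvParts s.toList []).all (fun p => p.length == 3) = true
    · rw [if_neg (by simp [hall]), if_pos hall]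
      congr 1
      rw [PySem.Str.replace]
      have h1 : (("," : String)).toList = [','] := by decide
      have h2 : (("" : String)).toList = ([] : List Char) := by decide
      rw [h1, h2, pvReplace_eq]
      rw [pvJoin_flatten, pvParts_flatten s.toList []]
      simp
    · rw [if_pos (by simp [hall]), if_neg (by simp [hall])]
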